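-- pv_equiv track=rewrite | github.com/christopheprudent/python-exercices | list/e153_list_element_at_least_n_times.py | check_element_in_list
-- ===== SOURCE A (Python) =====
-- def check_element_in_list(lst, x, n):
--     t = 0
--     try:
--         for _ in range(n):
--             t = lst.index(x, t) + 1
--         return True
--     except ValueError:
--         return False
-- ===== SOURCE B (Python) =====
-- def check_element_in_list(lst, x, n):
--     count = 0
--     for item in lst:
--         if item == x:
--             count += 1
--     return count >= n
-- ===== Notes on version B (the rewrite author's own statement) =====
-- stated objective: simpler
-- what changed: Replaces the exception-driven loop that calls lst.index(x, t) n times with a single flat counting scan over lst followed by 'count >= n'.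
import Mathlib
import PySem

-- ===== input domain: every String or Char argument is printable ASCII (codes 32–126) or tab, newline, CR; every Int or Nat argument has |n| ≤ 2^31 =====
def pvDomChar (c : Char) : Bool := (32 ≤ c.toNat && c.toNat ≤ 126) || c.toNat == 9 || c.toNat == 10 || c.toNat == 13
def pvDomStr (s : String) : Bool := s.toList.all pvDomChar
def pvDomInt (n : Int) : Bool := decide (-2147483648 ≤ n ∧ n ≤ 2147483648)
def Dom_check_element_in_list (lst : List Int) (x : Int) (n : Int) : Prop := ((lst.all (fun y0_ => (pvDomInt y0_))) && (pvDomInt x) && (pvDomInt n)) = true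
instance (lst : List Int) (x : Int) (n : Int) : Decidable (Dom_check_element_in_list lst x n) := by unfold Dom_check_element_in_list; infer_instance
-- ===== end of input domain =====

-- B replaces A's exception-driven repeated lst.index(x, t) loop with one flat counting scan; objective: simpler.

-- ===== PORT A =====
-- 'for _ in range(n): t = lst.index(x, t) + 1' — each step searches for x from position t
-- (lst.index(x, t) = t + first match index in lst.drop t; none = ValueError → return False).
def aLoop (lst : List Int) (x : Int) : Nat → Nat → Bool
  | 0, _ => true
  | k + 1, t =>
    match PySem.List.index? (lst.drop t) x with
    | none => false
    | some j => aLoop lst x k (t + j + 1)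

def check_element_in_list (lst : List Int) (x : Int) (n : Int) : Bool :=
  aLoop lst x n.toNat 0

-- ===== PORT B =====
def check_element_in_list_alt (lst : List Int) (x : Int) (n : Int) : Bool :=
  let count := lst.foldl (fun c item => if item == x then c + 1 else c) (0 : Int)
  decide (count ≥ n)

-- ===== PRECONDITION & SPEC =====
def Spec_check_element_in_list (lst : List Int) (x : Int) (n : Int) (out : Bool) : Prop := out = check_element_in_list_alt lst x n
instance (lst : List Int) (x : Int) (n : Int) (out : Bool) : Decidable (Spec_check_element_in_list lst x n out) := by unfold Spec_check_element_in_list; infer_instance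

-- ===== CLAIM (what is proved, stated in full; the proofs are below) =====
def Claim_equal_check_element_in_list : Prop := ∀ (lst : List Int) (x : Int) (n : Int), Dom_check_element_in_list lst x n → Spec_check_element_in_list lst x n (check_element_in_list lst x n)

-- ===== LEMMAS AND PROOFS =====

lemma count_of_index?_none {s : List Int} {x : Int} (h : PySem.List.index? s x = none) :
    s.count x = 0 := by
  have hx : x ∉ s := (PySem.List.index?_eq_none_iff s x).mp h
  exact List.count_eq_zero.mpr hx

lemma count_of_index?_some {s : List Int} {x : Int} {j : Nat}
    (h : PySem.List.index? s x = some j) :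
    s.count x = (s.drop (j + 1)).count x + 1 := by
  induction s generalizing j with
  | nil => simp [PySem.List.index?] at h
  | cons a s ih =>
    by_cases hax : a = x
    · subst hax
      rw [PySem.List.index?_cons_self] at h
      cases h
      simp
    · rw [PySem.List.index?_cons_of_ne s hax] at h
      cases hj : PySem.List.index? s x with
      | none => rw [hj] at h; simp at h
      | some j' =>
        rw [hj] at h
        simp only [Option.map_some, Option.some.injEq] at h
        subst h
        have hcount := ih hj
        simp only [List.count_cons, List.drop_succ_cons, hcount]
        simp [hax]

lemma aLoop_eq_count (lst : List Int) (x : Int) :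
    ∀ (fuel t : Nat), aLoop lst x fuel t = decide (fuel ≤ (lst.drop t).count x) := by
  intro fuel
  induction fuel with
  | zero => intro t; simp [aLoop]
  | succ k ih =>
    intro t
    cases hj : PySem.List.index? (lst.drop t) x with
    | none =>
      have h0 := count_of_index?_none hj
      rw [PySem.List.index?_eq_idxOf?] at hj
      simp [aLoop, hj, h0]
    | some j =>
      have hc := count_of_index?_some hj
      rw [List.drop_drop] at hc
      simp only [aLoop]
      rw [hj]
      show aLoop lst x k (t + j + 1) = decide (k + 1 ≤ (lst.drop t).count x)
      rw [ih (t + j + 1)]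
      rw [Nat.add_assoc t j 1, hc]
      simp only [decide_eq_decide]
      omega

lemma foldl_count (lst : List Int) (x : Int) :
    ∀ c0 : Int, lst.foldl (fun c item => if item == x then c + 1 else c) c0
      = c0 + (lst.count x : Int) := by
  induction lst with
  | nil => intro c0; simp
  | cons a s ih =>
    intro c0
    rw [List.foldl_cons]
    by_cases hax : a = x
    · rw [if_pos (by simp [hax]), ih, List.count_cons]
      simp [hax]
      ring
    · rw [if_neg (by simp [hax]), ih, List.count_cons]
      simp [hax]

-- ===== VERDICT (by name: the statement is the Claim_ definition above) =====
theorem check_element_in_list_spec : Claim_equal_check_element_in_list := by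
  intro lst x n _
  unfold Spec_check_element_in_list check_element_in_list check_element_in_list_alt
  rw [aLoop_eq_count, foldl_count]
  simp only [List.drop_zero, zero_add, ge_iff_le, decide_eq_decide]
  omega
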